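-- pv_equiv track=rewrite | github.com/tetious/rag-cookbook | 04-graph-rag/evals/entity_extraction.py | entities_match
-- ===== SOURCE A (Python) =====
-- def normalize_entity(entity: str) -> str:
--     """Normalize entity name for comparison."""
--     # Remove common variations
--     entity = entity.lower().strip()
--     entity = entity.replace("'s", "").replace("'", "")
--     entity = entity.replace("-", " ").replace("_", " ")
--     return entity
--
-- def entities_match(extracted: str, expected: str) -> bool:
--     """Check if two entities match (allowing for variations)."""
--     ext = normalize_entity(extracted)
--     exp = normalize_entity(expected)
--
--     # Exact match
--     if ext == exp:
--         return True
--
--     # One contains the other (e.g., "berkshire" matches "berkshire hathaway")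
--     if ext in exp or exp in ext:
--         return True
--
--     # Common aliases
--     aliases = {
--         "buffett": ["warren buffett", "warren", "mr buffett"],
--         "munger": ["charlie munger", "charlie", "mr munger"],
--         "berkshire": ["berkshire hathaway", "brk", "bh"],
--         "coca cola": ["coke", "ko"],
--         "american express": ["amex", "axp"],
--         "apple": ["aapl"],
--         "geico": ["government employees insurance"],
--     }
--
--     for canonical, variants in aliases.items():
--         all_forms = [canonical] + variants
--         if ext in all_forms and exp in all_forms:
--             return True
--
--     return False
-- ===== SOURCE B (Python) =====
-- def normalize_entity(entity: str) -> str: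
--     """Normalize entity name for comparison."""
--     entity = entity.lower().strip()
--     entity = entity.replace("'s", "").replace("'", "")
--     entity = entity.replace("-", " ").replace("_", " ")
--     return entity
--
-- _ALIASES = {
--     "buffett": ["warren buffett", "warren", "mr buffett"],
--     "munger": ["charlie munger", "charlie", "mr munger"],
--     "berkshire": ["berkshire hathaway", "brk", "bh"],
--     "coca cola": ["coke", "ko"],
--     "american express": ["amex", "axp"],
--     "apple": ["aapl"],
--     "geico": ["government employees insurance"],
-- }
--
-- # Flat index: every alias form -> its canonical group name (built once).
-- _FORM_GROUP = {form: canonical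
--                for canonical, variants in _ALIASES.items()
--                for form in [canonical, *variants]}
--
-- def entities_match(extracted: str, expected: str) -> bool:
--     """Check if two entities match (allowing for variations)."""
--     ext = normalize_entity(extracted)
--     exp = normalize_entity(expected)
--     if ext == exp:
--         return True
--     if ext in exp or exp in ext:
--         return True
--     g = _FORM_GROUP.get(ext)
--     return g is not None and g == _FORM_GROUP.get(exp)
-- ===== Notes on version B (the rewrite author's own statement) =====
-- stated objective: idiomatic
-- what changed: The per-group scan-and-rebuild alias loop is replaced by a flat form->canonical dict built once; the alias stage becomes two O(1) lookups compared for equality (guarded against both being absent).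
import Mathlib
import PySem

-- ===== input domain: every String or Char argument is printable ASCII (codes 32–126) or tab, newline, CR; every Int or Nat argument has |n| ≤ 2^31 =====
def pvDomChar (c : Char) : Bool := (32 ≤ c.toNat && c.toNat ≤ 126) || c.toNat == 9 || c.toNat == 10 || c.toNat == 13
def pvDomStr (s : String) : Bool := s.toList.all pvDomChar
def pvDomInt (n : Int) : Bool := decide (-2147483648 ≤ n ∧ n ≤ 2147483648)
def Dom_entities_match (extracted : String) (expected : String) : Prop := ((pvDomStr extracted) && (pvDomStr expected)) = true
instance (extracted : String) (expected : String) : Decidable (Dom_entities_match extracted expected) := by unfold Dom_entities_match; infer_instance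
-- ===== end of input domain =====

-- B replaces A's per-group alias scan by a flat form->canonical dict built once, then two lookups (idiomatic; same results).

-- ===== PORT A =====
-- shared helper: normalize_entity (identical in both Python sources)
def pvNorm (s : String) : String :=
  let e := PySem.Str.strip (PySem.Str.lower s)
  let e := PySem.Str.replace (PySem.Str.replace e "'s" "") "'" ""
  PySem.Str.replace (PySem.Str.replace e "-" " ") "_" " "

-- the aliases dict literal (same literal in both Python sources), as its items list
def pvAliases : List (String × List String) :=
  [("buffett", ["warren buffett", "warren", "mr buffett"]),
   ("munger", ["charlie munger", "charlie", "mr munger"]),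
   ("berkshire", ["berkshire hathaway", "brk", "bh"]),
   ("coca cola", ["coke", "ko"]),
   ("american express", ["amex", "axp"]),
   ("apple", ["aapl"]),
   ("geico", ["government employees insurance"])]

-- A's 'for canonical, variants in aliases.items(): ...' with early return
def pvAliasLoop : List (String × List String) → String → String → Bool
  | [], _, _ => false
  | (canonical, variants) :: rest, ext, exp =>
      let all_forms := canonical :: variants
      if all_forms.contains ext && all_forms.contains exp then true
      else pvAliasLoop rest ext exp

def entities_match (extracted : String) (expected : String) : Bool :=
  let ext := pvNorm extracted
  let exp := pvNorm expected
  if ext == exp then true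
  else if PySem.Str.isIn ext exp || PySem.Str.isIn exp ext then true
  else pvAliasLoop pvAliases ext exp

-- ===== PORT B =====
-- B's module-level dict comprehension: {form: canonical for canonical, variants in ALIASES.items() for form in [canonical, *variants]}
def pvFormGroup : PySem.Dict String String :=
  pvAliases.foldl
    (fun d p => (p.1 :: p.2).foldl (fun d form => d.insert form p.1) d)
    PySem.Dict.empty

def entities_match_alt (extracted : String) (expected : String) : Bool :=
  let ext := pvNorm extracted
  let exp := pvNorm expected
  if ext == exp then true
  else if PySem.Str.isIn ext exp || PySem.Str.isIn exp ext then true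
  else
    match pvFormGroup.get? ext with
    | none => false
    | some g => pvFormGroup.get? exp == some g

-- ===== PRECONDITION & SPEC =====
def Spec_entities_match (extracted : String) (expected : String) (out : Bool) : Prop := out = entities_match_alt extracted expected
instance (extracted : String) (expected : String) (out : Bool) : Decidable (Spec_entities_match extracted expected out) := by unfold Spec_entities_match; infer_instance

-- ===== CLAIM (what is proved, stated in full; the proofs are below) =====
def Claim_equal_entities_match : Prop := ∀ (extracted : String) (expected : String), Dom_entities_match extracted expected → Spec_entities_match extracted expected (entities_match extracted expected)

-- ===== LEMMAS AND PROOFS =====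

-- all 22 alias forms, in order
def pvAllForms : List String :=
  ["buffett", "warren buffett", "warren", "mr buffett",
   "munger", "charlie munger", "charlie", "mr munger",
   "berkshire", "berkshire hathaway", "brk", "bh",
   "coca cola", "coke", "ko",
   "american express", "amex", "axp",
   "apple", "aapl",
   "geico", "government employees insurance"]

lemma pvFormGroup_lit : pvFormGroup = PySem.Dict.mk
    [("buffett", "buffett"), ("warren buffett", "buffett"), ("warren", "buffett"), ("mr buffett", "buffett"),
     ("munger", "munger"), ("charlie munger", "munger"), ("charlie", "munger"), ("mr munger", "munger"),
     ("berkshire", "berkshire"), ("berkshire hathaway", "berkshire"), ("brk", "berkshire"), ("bh", "berkshire"),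
     ("coca cola", "coca cola"), ("coke", "coca cola"), ("ko", "coca cola"),
     ("american express", "american express"), ("amex", "american express"), ("axp", "american express"),
     ("apple", "apple"), ("aapl", "apple"),
     ("geico", "geico"), ("government employees insurance", "geico")] := by
  decide

lemma pvAlias_both_in : ∀ x ∈ pvAllForms, ∀ y ∈ pvAllForms,
    pvAliasLoop pvAliases x y =
      (match pvFormGroup.get? x with
       | none => false
       | some g => pvFormGroup.get? y == some g) := by
  decide

lemma pvNotForm_helpers (y : String) (hy : y ∉ pvAllForms) :
    pvFormGroup.get? y = none ∧ (∀ x, pvAliasLoop pvAliases x y = false) ∧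
      (∀ x, pvAliasLoop pvAliases y x = false) := by
  simp only [pvAllForms, List.mem_cons, List.not_mem_nil, or_false, not_or] at hy
  obtain ⟨h1,h2,h3,h4,h5,h6,h7,h8,h9,h10,h11,h12,h13,h14,h15,h16,h17,h18,h19,h20,h21,h22⟩ := hy
  refine ⟨?_, ?_, ?_⟩ <;>
  simp [pvAliasLoop, pvAliases, pvFormGroup_lit, PySem.Dict.get?,
        h1,h2,h3,h4,h5,h6,h7,h8,h9,h10,h11,h12,h13,h14,h15,h16,h17,h18,h19,h20,h21,h22,
        Ne.symm h1, Ne.symm h2, Ne.symm h3, Ne.symm h4, Ne.symm h5, Ne.symm h6, Ne.symm h7,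
        Ne.symm h8, Ne.symm h9, Ne.symm h10, Ne.symm h11, Ne.symm h12, Ne.symm h13, Ne.symm h14,
        Ne.symm h15, Ne.symm h16, Ne.symm h17, Ne.symm h18, Ne.symm h19, Ne.symm h20,
        Ne.symm h21, Ne.symm h22]

lemma pvAlias_equiv (x y : String) :
    pvAliasLoop pvAliases x y =
      (match pvFormGroup.get? x with
       | none => false
       | some g => pvFormGroup.get? y == some g) := by
  by_cases hx : x ∈ pvAllForms
  · by_cases hy : y ∈ pvAllForms
    · exact pvAlias_both_in x hx y hy
    · obtain ⟨hnone, hright, -⟩ := pvNotForm_helpers y hy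
      rw [hright x, hnone]
      cases pvFormGroup.get? x <;> simp
  · obtain ⟨hnone, -, hleft⟩ := pvNotForm_helpers x hx
    rw [hleft y, hnone]

-- ===== VERDICT (by name: the statement is the Claim_ definition above) =====
theorem entities_match_spec : Claim_equal_entities_match := by
  intro extracted expected _
  unfold Spec_entities_match
  simp only [entities_match, entities_match_alt, pvAlias_equiv]
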